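-- pv_equiv track=rewrite | github.com/faraz333/algorithms | FindConsecutiveOnes.py | findConswecutiveOnes
-- ===== SOURCE A (Python) =====
-- def findConswecutiveOnes(array):
--     max1=0
--     counter1=0
--     for i in range (0, len(array)):
--         if array[i] ==1:
--             counter1 =counter1+1
--             if counter1 > max1:
--                 max1=counter1
--         else:
--             counter1=0 #reset counter
--     return  max1
-- ===== SOURCE B (Python) =====
-- def findConswecutiveOnes(array):
--     # partition the array into maximal runs of equal elements (a groupby),
--     # collect the lengths of the runs of 1s, return their max with default 0
--     runs = []
--     i = 0
--     n = len(array)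
--     while i < n:
--         j = i
--         while j < n and array[j] == array[i]:
--             j += 1
--         if array[i] == 1:
--             runs.append(j - i)
--         i = j
--     return max(runs, default=0)
-- ===== Notes on version B (the rewrite author's own statement) =====
-- stated objective: alternative
-- what changed: B partitions the array into maximal runs of equal elements (a groupby), keeps the lengths of the runs of 1s and returns their maximum with default 0, instead of A's running counter/reset loop with an in-loop maximum.
import Mathlib
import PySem

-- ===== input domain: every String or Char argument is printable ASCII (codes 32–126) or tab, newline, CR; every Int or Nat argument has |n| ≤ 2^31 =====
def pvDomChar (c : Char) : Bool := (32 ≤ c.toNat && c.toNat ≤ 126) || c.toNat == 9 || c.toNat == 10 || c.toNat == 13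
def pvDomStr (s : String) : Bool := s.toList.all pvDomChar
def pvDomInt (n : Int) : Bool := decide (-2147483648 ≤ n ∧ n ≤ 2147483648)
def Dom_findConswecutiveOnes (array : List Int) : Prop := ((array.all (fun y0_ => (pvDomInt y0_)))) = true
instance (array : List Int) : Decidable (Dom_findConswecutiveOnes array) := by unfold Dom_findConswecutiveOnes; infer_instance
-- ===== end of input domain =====

-- B re-implements A as a partition-into-runs (groupby) followed by a max over the 1-run lengths;
-- same cost, alternative structure. Equivalence is proved for all inputs (both are total).

-- ===== PORT A =====
-- the loop body of A: counter/maximum update for one element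
def pvStep (st : Int × Int) (x : Int) : Int × Int :=
  if x = 1 then
    let c := st.2 + 1
    (if c > st.1 then c else st.1, c)
  else (st.1, 0)

def findConswecutiveOnes (array : List Int) : Int :=
  -- for i in range(0, len(array)): ... array[i] (index always in range, default never used)
  ((PySem.List.pyRange 0 (PySem.List.len array) 1).foldl
    (fun st i => pvStep st (PySem.List.pyGetD array i 0)) ((0 : Int), (0 : Int))).1

-- ===== PORT B =====
-- length of the leading run of elements equal to v (the inner `while` of B)
def pvLead (v : Int) : List Int → Nat
  | [] => 0
  | x :: xs => if x = v then pvLead v xs + 1 else 0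

-- B's outer loop: the lengths of the maximal runs of 1s, left to right
def pvRuns1 : List Int → List Int
  | [] => []
  | x :: xs =>
      let k := pvLead x xs
      let rest := pvRuns1 (xs.drop k)
      if x = 1 then ((k : Int) + 1) :: rest else rest
termination_by l => l.length
decreasing_by simp [List.length_drop]

def findConswecutiveOnes_alt (array : List Int) : Int :=
  -- max(runs, default=0)
  match PySem.List.max? (pvRuns1 array) (fun y => y) with
  | some m => m
  | none => 0

-- ===== PRECONDITION & SPEC =====
def Spec_findConswecutiveOnes (array : List Int) (out : Int) : Prop := out = findConswecutiveOnes_alt array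
instance (array : List Int) (out : Int) : Decidable (Spec_findConswecutiveOnes array out) := by unfold Spec_findConswecutiveOnes; infer_instance

-- ===== CLAIM (what is proved, stated in full; the proofs are below) =====
def Claim_equal_findConswecutiveOnes : Prop := ∀ (array : List Int), Dom_findConswecutiveOnes array → Spec_findConswecutiveOnes array (findConswecutiveOnes array)

-- ===== LEMMAS AND PROOFS =====

lemma pvLead_le (v : Int) : ∀ l : List Int, pvLead v l ≤ l.length := by
  intro l; induction l with
  | nil => simp [pvLead]
  | cons x xs ih => simp only [pvLead]; split <;> simp <;> omega

lemma pvRuns1_nil : pvRuns1 [] = [] := by rw [pvRuns1.eq_def]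

lemma pvRuns1_cons (x : Int) (xs : List Int) :
    pvRuns1 (x :: xs) =
      if x = 1 then ((pvLead x xs : Int) + 1) :: pvRuns1 (xs.drop (pvLead x xs))
      else pvRuns1 (xs.drop (pvLead x xs)) := by
  rw [pvRuns1.eq_def]

lemma mem_take_lead (v : Int) : ∀ l : List Int, ∀ x ∈ l.take (pvLead v l), x = v := by
  intro l; induction l with
  | nil => simp
  | cons y ys ih =>
    simp only [pvLead]
    split
    · next h =>
        intro x hx
        rw [List.take_succ_cons] at hx
        rcases List.mem_cons.mp hx with h1 | h2
        · exact h1.trans h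
        · exact ih x h2
    · simp

lemma head?_drop_lead (v : Int) : ∀ l : List Int, ∀ y, (l.drop (pvLead v l)).head? = some y → y ≠ v := by
  intro l; induction l with
  | nil => simp
  | cons x xs ih =>
    simp only [pvLead]
    split
    · next h => intro y hy; exact ih y hy
    · next h => intro y hy; simp at hy; omega

lemma pvRuns1_cons_nonone (v : Int) (hv : v ≠ 1) : ∀ l : List Int, pvRuns1 (v :: l) = pvRuns1 l := by
  intro l
  rw [pvRuns1_cons, if_neg hv]
  cases l with
  | nil => simp [pvLead]
  | cons w ws =>
    by_cases hw : w = v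
    · subst hw
      rw [show pvRuns1 (w :: ws) = pvRuns1 (ws.drop (pvLead w ws)) from by
            rw [pvRuns1_cons, if_neg hv]]
      simp [pvLead]
    · simp [pvLead, hw]

-- fold of A's loop over a block of 1s
lemma fold_ones : ∀ l : List Int, (∀ x ∈ l, x = 1) → ∀ m c : Int, 0 ≤ c → c ≤ m →
    l.foldl pvStep (m, c) = (max m (c + l.length), c + l.length) := by
  intro l; induction l with
  | nil => intro _ m c _ hcm; simp; omega
  | cons x xs ih =>
    intro hall m c hc hcm
    have hx : x = 1 := hall x (by simp)
    have hstep : pvStep (m, c) x = (max m (c + 1), c + 1) := by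
      simp [pvStep, hx]; split <;> omega
    rw [List.foldl_cons, hstep, ih (fun y hy => hall y (by simp [hy])) _ _ (by omega) (by omega)]
    simp only [List.length_cons, Prod.mk.injEq]
    push_cast
    constructor <;> omega

-- A's fold from (m, 0) equals the running max over B's run lengths
lemma fold_eq_runs (n : Nat) : ∀ l : List Int, l.length ≤ n → ∀ m : Int, 0 ≤ m →
    (l.foldl pvStep (m, 0)).1 = (pvRuns1 l).foldl max m := by
  induction n with
  | zero =>
    intro l hl m _
    have : l = [] := List.eq_nil_of_length_eq_zero (by omega)
    subst this; simp [pvRuns1_nil]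
  | succ n ih =>
    intro l hl m hm
    cases l with
    | nil => simp [pvRuns1_nil]
    | cons x xs =>
      by_cases hx : x = 1
      · subst hx
        set k := pvLead 1 xs with hk
        have hkle : k ≤ xs.length := pvLead_le 1 xs
        have hones : ∀ y ∈ (1 : Int) :: xs.take k, y = 1 := by
          intro y hy
          rcases List.mem_cons.mp hy with h | h
          · exact h
          · exact mem_take_lead 1 xs y h
        have hlen : ((1 : Int) :: xs.take k).length = k + 1 := by
          simp [List.length_take, Nat.min_eq_left hkle]
        have hfold : List.foldl pvStep (m, 0) ((1 : Int) :: xs)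
            = List.foldl pvStep (max m ((k : Int) + 1), (k : Int) + 1) (xs.drop k) := by
          conv_lhs => rw [show (1 : Int) :: xs = ((1 : Int) :: xs.take k) ++ xs.drop k from by
                            simp [List.take_append_drop]]
          rw [List.foldl_append, fold_ones _ hones m 0 le_rfl hm, hlen]
          push_cast
          ring_nf
        have hrw : pvRuns1 ((1 : Int) :: xs) = ((k : Int) + 1) :: pvRuns1 (xs.drop k) := by
          rw [pvRuns1_cons]; simp [← hk]
        rw [hfold, hrw]
        cases hrest : xs.drop k with
        | nil =>
          simp [pvRuns1_nil]
        | cons y ys =>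
          have hy1 : y ≠ 1 := head?_drop_lead 1 xs y (by rw [← hk, hrest]; rfl)
          have hstep : pvStep (max m ((k : Int) + 1), (k : Int) + 1) y
              = (max m ((k : Int) + 1), 0) := by
            simp [pvStep, hy1]
          have hys : ys.length ≤ n := by
            have h2 := congrArg List.length hrest
            simp [List.length_drop] at h2 hl
            omega
          rw [List.foldl_cons, hstep, ih ys hys _ (by positivity),
              pvRuns1_cons_nonone y hy1 ys]
          simp only [List.foldl_cons]
      · have hstep : pvStep (m, 0) x = (m, 0) := by simp [pvStep, hx]
        rw [List.foldl_cons, hstep, ih xs (by simp at hl; omega) m hm,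
            pvRuns1_cons_nonone x hx xs]

lemma runs1_pos : ∀ l : List Int, ∀ r ∈ pvRuns1 l, 0 < r := by
  intro l
  induction hn : l.length using Nat.strong_induction_on generalizing l with
  | _ n ih =>
    cases l with
    | nil => simp [pvRuns1_nil]
    | cons x xs =>
      rw [pvRuns1_cons]
      have hk := pvLead_le x xs
      have hrec : ∀ r ∈ pvRuns1 (xs.drop (pvLead x xs)), 0 < r := by
        intro r hr
        refine ih (xs.drop (pvLead x xs)).length ?_ _ rfl r hr
        simp [List.length_drop] at *
        omega
      split
      · intro r hr
        rcases List.mem_cons.mp hr with h | h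
        · omega
        · exact hrec r h
      · exact hrec

-- ===== VERDICT (by name: the statement is the Claim_ definition above) =====
theorem findConswecutiveOnes_spec : Claim_equal_findConswecutiveOnes := by
  intro array _
  unfold Spec_findConswecutiveOnes findConswecutiveOnes findConswecutiveOnes_alt
  rw [PySem.List.foldl_pyRange_zero_pyGetD]
  rw [fold_eq_runs array.length array le_rfl 0 le_rfl]
  cases hr : pvRuns1 array with
  | nil => simp [PySem.List.max?]
  | cons r rs =>
    rw [PySem.List.max?_id_cons]
    have hrpos : 0 < r := runs1_pos array r (by rw [hr]; simp)
    have hall : ∀ y ∈ rs, 0 < y := fun y hy => runs1_pos array y (by rw [hr]; simp [hy])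
    -- foldl max 0 (r :: rs) = foldl max r rs since all elements positive
    simp only [List.foldl_cons]
    have : max (0 : Int) r = r := by omega
    rw [this]
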